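-- pv_equiv track=rewrite | github.com/pypi-data/pypi-mirror-9 | packages/ocpgdb/ocpgdb-2.0.2.tar.gz/ocpgdb-2.0.2/ocpgdb/cvtdecimal.py | _unpack_digits
-- ===== SOURCE A (Python) =====
-- def _unpack_digits(words):
--     shift = (1000, 100, 10, 1)
--     digits = []
--     for word in words:
--         for s in shift:
--             d = word // s % 10
--             if digits or d:
--                 digits.append(d)
--     return digits
-- ===== SOURCE B (Python) =====
-- def _unpack_digits(words):
--     # Pack every word's low four decimal digits into one big base-10000 integer,
--     # then peel the decimal digits of that number back off; leading zeros vanish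
--     # arithmetically because the number does not record them.
--     n = 0
--     for word in words:
--         n = n * 10000 + word % 10000
--     digits = []
--     while n:
--         n, d = divmod(n, 10)
--         digits.append(d)
--     digits.reverse()
--     return digits
-- ===== Notes on version B (the rewrite author's own statement) =====
-- stated objective: alternative
-- what changed: B replaces A's nested digit-appending loops with arithmetic: it packs all words into one big base-10000 integer (word % 10000 each), then peels that number's decimal digits off back-to-front with divmod and reverses; leading zeros disappear arithmetically instead of via A's 'if digits or d' guard.
import Mathlib
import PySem

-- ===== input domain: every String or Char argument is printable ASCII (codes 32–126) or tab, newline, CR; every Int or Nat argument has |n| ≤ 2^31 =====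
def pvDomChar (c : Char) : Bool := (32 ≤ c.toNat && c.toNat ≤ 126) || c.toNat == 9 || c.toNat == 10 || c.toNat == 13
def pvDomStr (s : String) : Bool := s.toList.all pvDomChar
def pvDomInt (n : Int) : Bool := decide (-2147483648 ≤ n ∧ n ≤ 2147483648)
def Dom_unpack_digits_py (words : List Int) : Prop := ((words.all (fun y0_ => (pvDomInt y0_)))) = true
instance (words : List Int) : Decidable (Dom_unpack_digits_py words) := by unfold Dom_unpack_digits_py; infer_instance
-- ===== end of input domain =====

-- B packs the words into one big base-10000 integer and peels its decimal digits
-- back off, instead of A's nested append-with-guard loops (objective: alternative).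


-- ===== PORT A =====
-- literal port: nested loops, append under the 'digits or d' guard
def unpack_digits_py (words : List Int) : List Int :=
  words.foldl (fun digits word =>
    ([1000, 100, 10, 1] : List Int).foldl (fun digits s =>
      let d : Int := PySem.Int.mod (PySem.Int.floordiv word s) 10
      if digits ≠ [] ∨ d ≠ 0 then digits ++ [d] else digits) digits) []

-- ===== PORT B =====
-- 'while n: n, d = divmod(n, 10); digits.append(d)' (n is provably nonnegative, so
-- the loop recurses on n.toNat); builds the little-endian digit list, reversed below
def pvPeel (n : Nat) : List Int :=
  if _h : n = 0 then [] else ((n % 10 : Nat) : Int) :: pvPeel (n / 10)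
  decreasing_by exact Nat.div_lt_self (Nat.pos_of_ne_zero ‹_›) (by norm_num)

-- literal port of Source B: fold the words into one base-10000 integer, peel, reverse
def unpack_digits_py_alt (words : List Int) : List Int :=
  let n : Int := words.foldl (fun n word => n * 10000 + PySem.Int.mod word 10000) 0
  (pvPeel n.toNat).reverse

-- ===== PRECONDITION & SPEC =====
def Spec_unpack_digits_py (words : List Int) (out : List Int) : Prop := out = unpack_digits_py_alt words
instance (words : List Int) (out : List Int) : Decidable (Spec_unpack_digits_py words out) := by unfold Spec_unpack_digits_py; infer_instance

-- ===== CLAIM (what is proved, stated in full; the proofs are below) =====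
def Claim_equal_unpack_digits_py : Prop := ∀ (words : List Int), Dom_unpack_digits_py words → Spec_unpack_digits_py words (unpack_digits_py words)

-- ===== LEMMAS AND PROOFS =====
-- A's loop body on a single digit
def pvStep (digits : List Int) (d : Int) : List Int :=
  if digits ≠ [] ∨ d ≠ 0 then digits ++ [d] else digits

theorem pvStep_foldl_ne_nil (ds : List Int) (acc : List Int) (h : acc ≠ []) :
    ds.foldl pvStep acc = acc ++ ds := by
  induction ds generalizing acc with
  | nil => simp
  | cons d ds ih =>
    simp only [List.foldl_cons, pvStep, if_pos (Or.inl h)]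
    rw [ih _ (by simp)]
    simp

theorem pvStep_foldl_nil (ds : List Int) :
    ds.foldl pvStep [] = ds.dropWhile (fun d => d == 0) := by
  induction ds with
  | nil => rfl
  | cons d ds ih =>
    by_cases hd : d = 0
    · subst hd
      simpa [List.foldl_cons, pvStep, List.dropWhile] using ih
    · simp only [List.foldl_cons, pvStep, if_pos (Or.inr hd), List.nil_append]
      rw [pvStep_foldl_ne_nil ds [d] (by simp), List.dropWhile_cons_of_neg (by simpa)]
      simp

theorem pvStep_foldl_flatMap (f : Int → List Int) (words : List Int) (acc : List Int) :
    words.foldl (fun acc w => (f w).foldl pvStep acc) acc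
      = (words.flatMap f).foldl pvStep acc := by
  induction words generalizing acc with
  | nil => rfl
  | cons w ws ih => simp [List.foldl_append, ih]

-- the four decimal digits (as Nats) of word % 10000, big-endian
def pvGroup (w : Int) : List Nat :=
  [(w % 10000).toNat / 1000 % 10, (w % 10000).toNat / 100 % 10,
   (w % 10000).toNat / 10 % 10, (w % 10000).toNat % 10]

theorem pvGroup_eq (w : Int) :
    ([1000, 100, 10, 1] : List Int).map
        (fun s => PySem.Int.mod (PySem.Int.floordiv w s) 10)
      = (pvGroup w).map (fun (d : Nat) => (d : Int)) := by
  have h : ∀ s : Int, 0 < s → PySem.Int.floordiv w s = w / s :=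
    fun s hs => PySem.Int.floordiv_eq_ediv_of_pos hs
  have hm : ∀ x : Int, PySem.Int.mod x 10 = x % 10 :=
    fun x => PySem.Int.mod_eq_emod_of_pos (by norm_num)
  simp only [List.map, pvGroup, h 1000 (by norm_num), h 100 (by norm_num),
    h 10 (by norm_num), h 1 (by norm_num), hm, Int.ediv_one, List.cons.injEq, and_true]
  refine ⟨by omega, by omega, by omega, by omega⟩

-- A equals: drop the leading zeros of the flattened Nat digit list, cast to Int
theorem unpack_digits_py_eq (words : List Int) :
    unpack_digits_py words
      = ((words.flatMap pvGroup).dropWhile (fun d => d == 0)).map (fun (d : Nat) => (d : Int)) := by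
  unfold unpack_digits_py
  have h1 : ∀ (word : Int) (digits : List Int),
      ([1000, 100, 10, 1] : List Int).foldl (fun digits s =>
        let d : Int := PySem.Int.mod (PySem.Int.floordiv word s) 10
        if digits ≠ [] ∨ d ≠ 0 then digits ++ [d] else digits) digits
      = ((pvGroup word).map (fun (d : Nat) => (d : Int))).foldl pvStep digits := by
    intro word digits
    rw [← pvGroup_eq]
    simp [pvStep]
  have hp : ((fun d => d == 0) ∘ (fun (d : Nat) => (d : Int))) = (fun (d : Nat) => d == 0) := by
    funext d
    by_cases h : d = 0 <;> simp [h]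
  calc words.foldl (fun digits word =>
        ([1000, 100, 10, 1] : List Int).foldl (fun digits s =>
          let d : Int := PySem.Int.mod (PySem.Int.floordiv word s) 10
          if digits ≠ [] ∨ d ≠ 0 then digits ++ [d] else digits) digits) []
      = words.foldl (fun digits word =>
          ((pvGroup word).map (fun (d : Nat) => (d : Int))).foldl pvStep digits) [] := by
        induction words using List.reverseRecOn with
        | nil => rfl
        | append_singleton ws w ih =>
          simp only [List.foldl_append, List.foldl_cons, List.foldl_nil, h1]
    _ = (words.flatMap (fun w => (pvGroup w).map (fun (d : Nat) => (d : Int)))).foldl pvStep [] :=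
        pvStep_foldl_flatMap _ words []
    _ = _ := by
        rw [pvStep_foldl_nil, ← List.map_flatMap, List.dropWhile_map, hp]

theorem pvGroup_lt (w : Int) : ∀ d ∈ pvGroup w, d < 10 := by
  simp [pvGroup]; omega

theorem pvGroup_val (w : Int) :
    (((Nat.ofDigits 10 (pvGroup w).reverse : Nat)) : Int) = PySem.Int.mod w 10000 := by
  rw [PySem.Int.mod_eq_emod_of_pos (by norm_num)]
  have h0 : 0 ≤ w % 10000 := Int.emod_nonneg w (by norm_num)
  have hrev : (pvGroup w).reverse = [(w % 10000).toNat % 10, (w % 10000).toNat / 10 % 10,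
      (w % 10000).toNat / 100 % 10, (w % 10000).toNat / 1000 % 10] := by
    simp [pvGroup]
  have key : (Nat.ofDigits 10 [(w % 10000).toNat % 10, (w % 10000).toNat / 10 % 10,
      (w % 10000).toNat / 100 % 10, (w % 10000).toNat / 1000 % 10] : Nat) = (w % 10000).toNat := by
    simp [Nat.ofDigits_cons, Nat.ofDigits_nil]
    omega
  rw [hrev, key]
  omega

theorem pvFold_eq (words : List Int) :
    words.foldl (fun n word => n * 10000 + PySem.Int.mod word 10000) 0
      = ((Nat.ofDigits 10 (words.flatMap pvGroup).reverse : Nat) : Int) := by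
  induction words using List.reverseRecOn with
  | nil => simp [Nat.ofDigits_nil]
  | append_singleton ws w ih =>
    rw [List.foldl_append, List.foldl_cons, List.foldl_nil, ih]
    have hn : Nat.ofDigits 10 (List.flatMap pvGroup (ws ++ [w])).reverse
        = Nat.ofDigits 10 (pvGroup w).reverse
          + 10000 * Nat.ofDigits 10 (List.flatMap pvGroup ws).reverse := by
      rw [List.flatMap_append, List.flatMap_singleton, List.reverse_append, Nat.ofDigits_append]
      have hlen : (pvGroup w).reverse.length = 4 := by simp [pvGroup]
      rw [hlen]
      norm_num
    rw [hn]
    have hv := pvGroup_val w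
    push_cast at hv ⊢
    linarith

theorem pvPeel_eq_digits (n : Nat) :
    pvPeel n = (Nat.digits 10 n).map (fun (d : Nat) => (d : Int)) := by
  induction n using Nat.strong_induction_on with
  | _ n ih =>
    rw [pvPeel]
    by_cases h : n = 0
    · simp [h]
    · rw [dif_neg h, Nat.digits_def' (by norm_num) (Nat.pos_of_ne_zero h), List.map_cons,
        ih (n / 10) (Nat.div_lt_self (Nat.pos_of_ne_zero h) (by norm_num))]

-- ===== VERDICT (by name: the statement is the Claim_ definition above) =====
theorem unpack_digits_py_spec : Claim_equal_unpack_digits_py := by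
  intro words _
  unfold Spec_unpack_digits_py
  have halt : unpack_digits_py_alt words
      = (pvPeel (words.foldl (fun n word => n * 10000 + PySem.Int.mod word 10000) 0).toNat).reverse := rfl
  rw [halt, unpack_digits_py_eq, pvPeel_eq_digits]
  set F : List Nat := words.flatMap pvGroup with hF
  set L : List Nat := F.dropWhile (fun d => d == 0) with hL
  have hsplit : F = F.takeWhile (fun d => d == 0) ++ L := (List.takeWhile_append_dropWhile).symm
  have hT : F.takeWhile (fun d => d == 0)
      = List.replicate (F.takeWhile (fun d => d == 0)).length 0 := by
    rw [List.eq_replicate_iff]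
    exact ⟨rfl, fun b hb => by simpa using List.mem_takeWhile_imp hb⟩
  have hval : (words.foldl (fun n word => n * 10000 + PySem.Int.mod word 10000) 0).toNat
      = Nat.ofDigits 10 L.reverse := by
    have h := pvFold_eq words
    rw [← hF, hsplit, hT] at h
    rw [h]
    simp only [List.reverse_append, List.reverse_replicate,
      Nat.ofDigits_append_replicate_zero, Int.toNat_natCast]
  have hlt : ∀ d ∈ L.reverse, d < 10 := by
    intro d hd
    have hdF : d ∈ F := (List.dropWhile_sublist _).mem (by simpa using hd)
    obtain ⟨w, _, hw⟩ := List.mem_flatMap.mp hdF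
    exact pvGroup_lt w d hw
  have hlast : ∀ h : L.reverse ≠ [], L.reverse.getLast h ≠ 0 := by
    intro h
    rw [List.getLast_reverse]
    have hne : L ≠ [] := by simpa using h
    have h0 : (L.head hne == 0) = false := List.head_dropWhile_not (fun (d : Nat) => d == 0) hne
    simpa using h0
  have hdig : Nat.digits 10 (Nat.ofDigits 10 L.reverse) = L.reverse :=
    Nat.digits_ofDigits 10 (by norm_num) L.reverse hlt hlast
  rw [hval, hdig, ← List.map_reverse, List.reverse_reverse]
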